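-- pv_equiv track=rewrite | github.com/NeZoX-coder/Python_labs | lab2.py | decode_abc
-- ===== SOURCE A (Python) =====
-- from collections import Counter
--
-- def decode_abc(abc, sentences):
--     letters = Counter(str(sentences))
--     only_letters = dict()
--     for key, value in letters.items():
--         if key in abc:
--             only_letters[key] = value
--     sorted_letters = sorted(only_letters.items(), key=lambda x: x[1], reverse=True)
--     letters_letters = dict()
--     for i in range(len(sorted_letters)):
--         letters_letters[sorted_letters[i][0]] = abc[i]
--     return letters_letters
-- ===== SOURCE B (Python) =====
-- def decode_abc(abc, sentences):
--     counts = {}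
--     for ch in str(sentences):
--         if ch in abc:
--             counts[ch] = counts.get(ch, 0) + 1
--     items = list(counts.items())
--     k = len(items)
--     out = [None] * k
--     for i in range(k):
--         ch, c = items[i]
--         r = 0
--         for j in range(k):
--             cj = items[j][1]
--             if cj > c or (cj == c and j < i):
--                 r += 1
--         out[r] = (ch, abc[r])
--     result = {}
--     for pair in out:
--         result[pair[0]] = pair[1]
--     return result
-- ===== Notes on version B (the rewrite author's own statement) =====
-- stated objective: alternative
-- what changed: Removes the sort entirely: after one filtered counting pass, each kept letter's final slot is computed directly as its rank (number of letters with a strictly larger count, or an equal count and an earlier first occurrence) and the pair (letter, abc[rank]) is written straight into a pre-sized output array, instead of Counter + dict-filter + stable descending sort + index loop.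
import Mathlib
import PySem

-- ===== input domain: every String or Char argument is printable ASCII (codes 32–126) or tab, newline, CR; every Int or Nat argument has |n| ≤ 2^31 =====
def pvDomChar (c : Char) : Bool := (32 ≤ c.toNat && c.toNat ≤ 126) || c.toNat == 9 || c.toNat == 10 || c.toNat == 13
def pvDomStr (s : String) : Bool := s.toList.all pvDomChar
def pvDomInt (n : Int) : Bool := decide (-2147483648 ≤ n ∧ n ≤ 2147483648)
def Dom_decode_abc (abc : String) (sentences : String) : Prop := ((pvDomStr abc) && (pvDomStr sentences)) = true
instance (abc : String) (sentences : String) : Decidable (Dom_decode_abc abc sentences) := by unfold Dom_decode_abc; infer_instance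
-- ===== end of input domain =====

-- B removes the sort entirely: each kept letter's final slot is computed directly as its RANK
-- (how many letters beat it: strictly larger count, or equal count and earlier first occurrence)
-- and the pair is written straight into that slot of a pre-sized output (alternative algorithm,
-- same exact result including tie order).
-- Python dicts carry length-1 string keys (the characters); the ports work on Char and wrap the
-- final items into singleton Strings, which is exact.

-- ===== PORT A =====
-- 'key in abc' for a length-1 string key is exactly substring membership: PySem.Str.isIn.
-- abc[i] can never raise here (distinct kept letters ≤ distinct letters of abc ≤ len(abc)),
-- so the total PySem.List.pyGetD is exact; likewise sorted_letters[i] with i < length.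
def decode_abc (abc : String) (sentences : String) : List (String × String) :=
  let letters : PySem.Dict Char Int := PySem.Dict.counter sentences.toList
  let only_letters : PySem.Dict Char Int :=
    letters.items.foldl (fun d kv =>
      if PySem.Str.isIn (String.ofList [kv.1]) abc then d.insert kv.1 kv.2 else d) PySem.Dict.empty
  let sorted_letters := PySem.List.sorted only_letters.items (fun x => x.2) true
  let letters_letters : PySem.Dict Char Char :=
    (PySem.List.pyRange 0 (sorted_letters.length : Int) 1).foldl (fun d i =>
      d.insert (PySem.List.pyGetD sorted_letters i (' ', 0)).1
               (PySem.List.pyGetD abc.toList i ' ')) PySem.Dict.empty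
  letters_letters.items.map (fun p => (String.ofList [p.1], String.ofList [p.2]))

-- ===== PORT B =====
-- 'for i in range(k)' over Nat indices is List.range k; items[i]/items[j] with an index < k and
-- abc[r] with r < len(abc) (ranks are < k ≤ len(abc)) cannot raise, so getD/pyGetD are exact.
-- 'out[r] = (ch, abc[r])' is List.set; the final loop reads only assigned slots (the ranks are a
-- permutation of range(k)), so the 'none' branch of the match is unreachable and the port is exact.
def decode_abc_alt (abc : String) (sentences : String) : List (String × String) :=
  let counts : PySem.Dict Char Int :=
    sentences.toList.foldl (fun d ch =>
      if PySem.Str.isIn (String.ofList [ch]) abc then d.modify ch 0 (· + 1) else d) PySem.Dict.empty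
  let items := counts.items
  let k := items.length
  let out : List (Option (Char × Char)) :=
    (List.range k).foldl (fun o i =>
      let kv := items.getD i (' ', 0)
      let r : Nat := (List.range k).foldl (fun r j =>
        let cj := (items.getD j (' ', 0)).2
        if cj > kv.2 ∨ (cj = kv.2 ∧ j < i) then r + 1 else r) 0
      o.set r (some (kv.1, PySem.List.pyGetD abc.toList (r : Int) ' '))) (List.replicate k none)
  let result : PySem.Dict Char Char :=
    out.foldl (fun d p => match p with
      | some q => d.insert q.1 q.2
      | none => d) PySem.Dict.empty
  result.items.map (fun p => (String.ofList [p.1], String.ofList [p.2]))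

-- ===== PRECONDITION & SPEC =====
def Spec_decode_abc (abc : String) (sentences : String) (out : List (String × String)) : Prop := out = decode_abc_alt abc sentences
instance (abc : String) (sentences : String) (out : List (String × String)) : Decidable (Spec_decode_abc abc sentences out) := by unfold Spec_decode_abc; infer_instance

-- ===== CLAIM (what is proved, stated in full; the proofs are below) =====
def Claim_equal_decode_abc : Prop := ∀ (abc : String) (sentences : String), Dom_decode_abc abc sentences → Spec_decode_abc abc sentences (decode_abc abc sentences)

-- ===== LEMMAS AND PROOFS =====

-- B's rank of the i-th item: how many items have a strictly larger count, or an equal count and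
-- an earlier position.
def pvRank (M : List (Char × Int)) (i : Nat) : Nat :=
  (List.range M.length).countP (fun j =>
    decide ((M.getD j (' ', 0)).2 > (M.getD i (' ', 0)).2 ∨
            ((M.getD j (' ', 0)).2 = (M.getD i (' ', 0)).2 ∧ j < i)))

-- 'r = 0; for j in …: if p j: r += 1'  ≡  countP
theorem pv_foldl_count {p : Nat → Prop} [DecidablePred p] :
    ∀ (l : List Nat) (a : Nat),
      l.foldl (fun r j => if p j then r + 1 else r) a = a + l.countP (fun j => decide (p j)) := by
  intro l
  induction l with
  | nil => intro a; simp
  | cons x xs ih =>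
      intro a
      by_cases h : p x <;> simp [h, ih, List.countP_cons] <;> omega

-- 'for x in l: if p x: d = F d x'  ≡  fold F over the p-filtered list
theorem pv_foldl_if_filter {α β : Type} (p : β → Bool) (F : α → β → α) :
    ∀ (l : List β) (a : α),
      l.foldl (fun d x => if p x then F d x else d) a = (l.filter p).foldl F a := by
  intro l
  induction l with
  | nil => intro a; rfl
  | cons x xs ih =>
      intro a
      by_cases h : p x = true <;> simp [h, ih]

-- set(filter) = filter(set)
theorem pv_ofList_filter {α : Type} [BEq α] [LawfulBEq α] (p : α → Bool) (l : List α) :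
    PySem.Set.ofList (l.filter p) = (PySem.Set.ofList l).filter p := by
  induction l using List.reverseRecOn with
  | nil => rfl
  | append_singleton l x ih =>
      rw [PySem.Set.ofList_append_singleton]
      by_cases h : p x
      · have hl : (l ++ [x]).filter p = l.filter p ++ [x] := by
          simp [List.filter_append, h]
        rw [hl, PySem.Set.ofList_append_singleton]
        by_cases hm : x ∈ PySem.Set.ofList l
        · have hml : x ∈ l := (PySem.Set.mem_ofList _ _).mp hm
          rw [PySem.Set.add_of_mem hm, PySem.Set.add_of_mem
              (show x ∈ PySem.Set.ofList (l.filter p) by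
                rw [PySem.Set.mem_ofList, List.mem_filter]; exact ⟨hml, h⟩), ih]
        · have hmf : x ∉ PySem.Set.ofList (l.filter p) := by
            rw [PySem.Set.mem_ofList, List.mem_filter]
            rintro ⟨hx, -⟩; exact hm ((PySem.Set.mem_ofList _ _).mpr hx)
          rw [PySem.Set.add_of_not_mem hm, PySem.Set.add_of_not_mem hmf, List.filter_append, ih]
          simp [h]
      · have hl : (l ++ [x]).filter p = l.filter p := by
          simp [List.filter_append, h]
        rw [hl, ih, PySem.Set.add_eq_ite]
        by_cases hm : x ∈ PySem.Set.ofList l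
        · rw [if_pos hm]
        · rw [if_neg hm, List.filter_append]
          simp [h]

theorem pv_insertBy_append_left {α : Type} (before : α → α → Bool) (x : α) (A B : List α)
    (hA : ∀ a ∈ A, before x a = false) :
    PySem.List.insertBy before x (A ++ B) = A ++ PySem.List.insertBy before x B := by
  induction A with
  | nil => rfl
  | cons a A ih =>
      have ha : before x a = false := hA a (by simp)
      simp [PySem.List.insertBy, ha, ih (fun a h => hA a (by simp [h]))]

theorem pv_insertBy_all_before {α : Type} (before : α → α → Bool) (x : α) (ys : List α)
    (h : ∀ y ∈ ys, before x y = true) :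
    PySem.List.insertBy before x ys = x :: ys := by
  cases ys with
  | nil => rfl
  | cons y ys => simp [PySem.List.insertBy, h y (by simp)]

-- getD of lists glued around a middle element
theorem pv_getD_middle {α : Type} (x d : α) :
    ∀ (T D : List α), (T ++ x :: D).getD T.length d = x := by
  intro T
  induction T with
  | nil => intro D; rfl
  | cons t T ih => intro D; simpa using ih D

theorem pv_getD_left {α : Type} (d : α) (T D : List α) (r : Nat) (h : r < T.length) :
    (T ++ D).getD r d = T.getD r d := by
  rw [List.getD_eq_getElem?_getD, List.getD_eq_getElem?_getD, List.getElem?_append_left h]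

theorem pv_getD_right {α : Type} (d : α) (T D : List α) (r : Nat) (h : T.length ≤ r) :
    (T ++ D).getD r d = D.getD (r - T.length) d := by
  rw [List.getD_eq_getElem?_getD, List.getD_eq_getElem?_getD, List.getElem?_append_right h]

theorem pv_getD_after_middle {α : Type} (x d : α) (T D : List α) (r : Nat) (h : T.length < r) :
    (T ++ x :: D).getD r d = (T ++ D).getD (r - 1) d := by
  rw [pv_getD_right d T (x :: D) r (le_of_lt h), pv_getD_right d T D (r - 1) (by omega)]
  have hk : r - T.length = (r - 1 - T.length) + 1 := by omega
  rw [hk]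
  simp

theorem pv_dropWhile_head_false {α : Type} (p : α → Bool) :
    ∀ (l : List α) (a : α) (t : List α), l.dropWhile p = a :: t → p a = false := by
  intro l
  induction l with
  | nil => intro a t h; simp [List.dropWhile] at h
  | cons x xs ih =>
      intro a t h
      rw [List.dropWhile_cons] at h
      by_cases hx : p x = true
      · rw [if_pos hx] at h; exact ih a t h
      · rw [if_neg hx] at h
        injection h with h1 h2
        rw [← h1]
        exact eq_false_of_ne_true hx

-- counting over indices = counting over elements
theorem pv_countP_range {α : Type} (q : α → Bool) (d : α) :
    ∀ (M : List α), (List.range M.length).countP (fun j => q (M.getD j d)) = M.countP q := by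
  intro M
  induction M using List.reverseRecOn with
  | nil => rfl
  | append_singleton L x ih =>
      rw [List.length_append, List.length_singleton, List.range_succ, List.countP_append]
      have h1 : (List.range L.length).countP (fun j => q ((L ++ [x]).getD j d))
          = (List.range L.length).countP (fun j => q (L.getD j d)) := by
        apply List.countP_congr
        intro j hj
        rw [pv_getD_left d L [x] j (List.mem_range.mp hj)]
      have h2 : (L ++ [x]).getD L.length d = x := by
        simpa using pv_getD_middle x d L []
      rw [h1, ih, List.countP_append]
      simp [List.countP_cons, h2]

theorem pv_rank_lt (M : List (Char × Int)) (i : Nat) (hi : i < M.length) :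
    pvRank M i < M.length := by
  have hle : pvRank M i ≤ M.length := by
    unfold pvRank
    calc _ ≤ (List.range M.length).length := List.countP_le_length
    _ = M.length := List.length_range
  rcases lt_or_eq_of_le hle with h | h
  · exact h
  · exfalso
    unfold pvRank at h
    have := List.countP_eq_length.mp (by rw [h, List.length_range]) i (List.mem_range.mpr hi)
    simp at this

-- MAIN: B's rank of item i is exactly its index in A's stable descending sort.
theorem pv_sorted_getD_rank :
    ∀ (M : List (Char × Int)) (i : Nat), i < M.length →
      (PySem.List.sorted M (fun x => x.2) true).getD (pvRank M i) (' ', 0) = M.getD i (' ', 0) := by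
  intro M
  induction M using List.reverseRecOn with
  | nil => intro i hi; simp at hi
  | append_singleton L x ih =>
      intro i hi
      -- the sort of L ++ [x] is the insertion of x into the sort of L
      rw [PySem.List.sorted_rev_eq_foldl_insertBy, List.foldl_append, List.foldl_cons,
        List.foldl_nil, ← PySem.List.sorted_rev_eq_foldl_insertBy]
      set S := PySem.List.sorted L (fun x => x.2) true with hSdef
      set T := S.takeWhile (fun a => decide (x.2 ≤ a.2)) with hTdef
      set D := S.dropWhile (fun a => decide (x.2 ≤ a.2)) with hDdef
      have hTD : T ++ D = S := List.takeWhile_append_dropWhile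
      have hSlen : S.length = L.length := PySem.List.length_sorted L (fun x => x.2) true
      have hT : ∀ a ∈ T, x.2 ≤ a.2 := by
        intro a ha; simpa using List.mem_takeWhile_imp ha
      have hD : ∀ a ∈ D, a.2 < x.2 := by
        have hpw : D.Pairwise (fun a b => b.2 ≤ a.2) :=
          (PySem.List.sorted_pairwise_rev L (fun x => x.2)).sublist (List.dropWhile_sublist _)
        intro a ha
        cases hDc : D with
        | nil => rw [hDc] at ha; simp at ha
        | cons a0 t =>
            have h0 : a0.2 < x.2 := by
              have := pv_dropWhile_head_false (fun a => decide (x.2 ≤ a.2)) S a0 t (by rw [← hDdef, hDc])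
              simp at this; omega
            rw [hDc] at ha
            rcases List.mem_cons.mp ha with rfl | hat
            · exact h0
            · have : a.2 ≤ a0.2 := by
                rw [hDc] at hpw
                exact (List.pairwise_cons.mp hpw).1 a hat
              omega
      -- insertion lands exactly between T and D
      have hins : PySem.List.insertBy (fun a b => decide ((fun x => x.2) b < (fun x => x.2) a)) x S
          = T ++ x :: D := by
        rw [← hTD, pv_insertBy_append_left _ x T _ (by
          intro a ha; have := hT a ha; simp; omega)]
        rw [pv_insertBy_all_before _ x D (by
          intro y hy; have := hD y hy; simp; omega)]
      rw [hins]
      -- the split position is the count of items with count ≥ x.2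
      have hTcount : T.length = L.countP (fun a => decide (x.2 ≤ a.2)) := by
        have hperm := (PySem.List.sorted_perm L (fun x => x.2) true).countP_eq
          (fun a => decide (x.2 ≤ a.2))
        rw [← hperm, ← hSdef, ← hTD, List.countP_append]
        have h1 : T.countP (fun a => decide (x.2 ≤ a.2)) = T.length :=
          List.countP_eq_length.mpr (by intro a ha; simpa using hT a ha)
        have h2 : D.countP (fun a => decide (x.2 ≤ a.2)) = 0 := by
          rw [List.countP_eq_zero]
          intro a ha; have := hD a ha; simpa using by omega
        omega
      by_cases hcase : i < L.length
      · -- old element: its rank shifts by one exactly when x beats it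
        have hgi : (L ++ [x]).getD i (' ', 0) = L.getD i (' ', 0) :=
          pv_getD_left (' ', 0) L [x] i hcase
        have hrank : pvRank (L ++ [x]) i
            = pvRank L i + (if x.2 > (L.getD i (' ', 0)).2 then 1 else 0) := by
          unfold pvRank
          rw [List.length_append, List.length_singleton, List.range_succ, List.countP_append]
          have hmid : (L ++ [x]).getD L.length (' ', 0) = x := by
            simpa using pv_getD_middle x (' ', 0) L []
          have hcong : (List.range L.length).countP (fun j =>
              decide (((L ++ [x]).getD j (' ', 0)).2 > ((L ++ [x]).getD i (' ', 0)).2 ∨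
                (((L ++ [x]).getD j (' ', 0)).2 = ((L ++ [x]).getD i (' ', 0)).2 ∧ j < i)))
              = (List.range L.length).countP (fun j =>
              decide ((L.getD j (' ', 0)).2 > (L.getD i (' ', 0)).2 ∨
                ((L.getD j (' ', 0)).2 = (L.getD i (' ', 0)).2 ∧ j < i))) := by
            apply List.countP_congr
            intro j hj
            rw [pv_getD_left (' ', 0) L [x] j (List.mem_range.mp hj), hgi]
          rw [hcong, List.countP_cons, List.countP_nil, hgi, hmid]
          have hni : ¬ (L.length < i) := by omega
          by_cases hx2 : x.2 > (L.getD i (' ', 0)).2 <;> simp [hx2, hni]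
        have hrkS : S.getD (pvRank L i) (' ', 0) = L.getD i (' ', 0) := ih i hcase
        have hrklt : pvRank L i < L.length := pv_rank_lt L i hcase
        by_cases hx2 : x.2 > (L.getD i (' ', 0)).2
        · -- x beats it: it sits in D, one slot later
          have hge : T.length ≤ pvRank L i := by
            by_contra hlt
            push_neg at hlt
            have hmem : S.getD (pvRank L i) (' ', 0) ∈ T := by
              rw [← hTD, pv_getD_left (' ', 0) T D _ hlt,
                List.getD_eq_getElem T (' ', 0) hlt]
              exact List.getElem_mem hlt
            have := hT _ hmem
            rw [hrkS] at this
            omega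
          rw [hrank, if_pos hx2, hgi,
            pv_getD_after_middle x (' ', 0) T D _ (by omega)]
          simpa [hTD] using hrkS
        · -- x does not beat it: same slot, inside T
          have hlt : pvRank L i < T.length := by
            by_contra hge
            push_neg at hge
            have hmem : S.getD (pvRank L i) (' ', 0) ∈ D := by
              rw [← hTD, pv_getD_right (' ', 0) T D _ hge]
              have hdl : pvRank L i - T.length < D.length := by
                have : T.length + D.length = S.length := by
                  rw [← hTD]; simp
                omega
              rw [List.getD_eq_getElem D (' ', 0) hdl]
              exact List.getElem_mem hdl
            have := hD _ hmem
            rw [hrkS] at this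
            omega
          rw [hrank, if_neg hx2, Nat.add_zero, hgi, pv_getD_left (' ', 0) T (x :: D) _ hlt]
          rw [← pv_getD_left (' ', 0) T D _ hlt, hTD]
          exact hrkS
      · -- the new element x: its rank is the split position
        have hieq : i = L.length := by
          rw [List.length_append, List.length_singleton] at hi
          omega
        subst hieq
        have hgx : (L ++ [x]).getD L.length (' ', 0) = x := by
          simpa using pv_getD_middle x (' ', 0) L []
        have hrank : pvRank (L ++ [x]) L.length = T.length := by
          unfold pvRank
          rw [List.length_append, List.length_singleton, List.range_succ, List.countP_append]
          have hcong : (List.range L.length).countP (fun j =>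
              decide (((L ++ [x]).getD j (' ', 0)).2 > ((L ++ [x]).getD L.length (' ', 0)).2 ∨
                (((L ++ [x]).getD j (' ', 0)).2 = ((L ++ [x]).getD L.length (' ', 0)).2 ∧ j < L.length)))
              = (List.range L.length).countP (fun a => decide (x.2 ≤ (L.getD a (' ', 0)).2)) := by
            apply List.countP_congr
            intro j hj
            have hjl := List.mem_range.mp hj
            rw [pv_getD_left (' ', 0) L [x] j hjl, hgx]
            simp only [decide_eq_true_eq]
            constructor
            · intro h; rcases h with h | h <;> omega
            · intro h
              rcases lt_or_eq_of_le h with h' | h'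
              · left; omega
              · right; exact ⟨h'.symm, hjl⟩
          rw [hcong, pv_countP_range (fun a => decide (x.2 ≤ a.2)) (' ', 0) L, ← hTcount,
            List.countP_cons, List.countP_nil, hgx]
          simp
        rw [hrank, hgx, pv_getD_middle x (' ', 0) T D]
  
theorem pv_rank_inj (M : List (Char × Int)) (hnd : M.Nodup) {i i' : Nat}
    (hi : i < M.length) (hi' : i' < M.length) (h : pvRank M i = pvRank M i') : i = i' := by
  have h1 := pv_sorted_getD_rank M i hi
  have h2 := pv_sorted_getD_rank M i' hi'
  rw [h] at h1
  have hMeq : M.getD i (' ', 0) = M.getD i' (' ', 0) := h1 ▸ h2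
  rw [List.getD_eq_getElem M (' ', 0) hi, List.getD_eq_getElem M (' ', 0) hi'] at hMeq
  exact (List.Nodup.getElem_inj_iff hnd).mp hMeq

theorem pv_rank_surj (M : List (Char × Int)) (hnd : M.Nodup) (r : Nat) (hr : r < M.length) :
    ∃ i, i < M.length ∧ pvRank M i = r := by
  have hsurj : Function.Surjective (fun i : Fin M.length => (⟨pvRank M i, pv_rank_lt M i i.isLt⟩ : Fin M.length)) := by
    apply Finite.injective_iff_surjective.mp
    intro a b hab
    exact Fin.ext (pv_rank_inj M hnd a.isLt b.isLt (by simpa using congrArg Fin.val hab))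
  obtain ⟨i, hi⟩ := hsurj ⟨r, hr⟩
  exact ⟨i.1, i.isLt, by simpa using congrArg Fin.val hi⟩

-- a fold of writes at pairwise-distinct positions, read back
theorem pv_foldl_set_length {α : Type} :
    ∀ (ps : List (Nat × α)) (init : List (Option α)),
      (ps.foldl (fun o p => o.set p.1 (some p.2)) init).length = init.length := by
  intro ps
  induction ps with
  | nil => intro init; rfl
  | cons p ps ih => intro init; rw [List.foldl_cons, ih, List.length_set]

theorem pv_foldl_set_getD_notmem {α : Type} (r : Nat) :
    ∀ (ps : List (Nat × α)) (init : List (Option α)), (∀ p ∈ ps, p.1 ≠ r) →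
      (ps.foldl (fun o p => o.set p.1 (some p.2)) init).getD r none = init.getD r none := by
  intro ps
  induction ps with
  | nil => intro init _; rfl
  | cons p ps ih =>
      intro init h
      rw [List.foldl_cons, ih _ (fun q hq => h q (by simp [hq]))]
      rw [List.getD_eq_getElem?_getD, List.getD_eq_getElem?_getD,
        List.getElem?_set_ne (h p (by simp))]

theorem pv_foldl_set_getD {α : Type} :
    ∀ (ps : List (Nat × α)) (init : List (Option α)) (r : Nat) (v : α),
      (ps.map Prod.fst).Nodup → (r, v) ∈ ps → r < init.length →
      (ps.foldl (fun o p => o.set p.1 (some p.2)) init).getD r none = some v := by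
  intro ps
  induction ps with
  | nil => intro init r v _ hmem _; simp at hmem
  | cons p ps ih =>
      intro init r v hnd hmem hr
      obtain ⟨hnotin, hnd'⟩ := List.nodup_cons.mp (by rw [List.map_cons] at hnd; exact hnd)
      rw [List.foldl_cons]
      rcases List.mem_cons.mp hmem with heq | hmem'
      · subst heq
        rw [pv_foldl_set_getD_notmem r ps _ (by
          intro qp hqp hq1
          exact hnotin (List.mem_map.mpr ⟨qp, hqp, hq1⟩))]
        rw [List.getD_eq_getElem?_getD]
        simp [hr]
      · exact ih _ r v hnd' hmem' (by simpa [List.length_set] using hr)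

-- B's write loop produces A's sorted sequence, slot by slot
theorem pv_build_out (ab : List Char) (M : List (Char × Int)) (hnd : (M.map Prod.fst).Nodup) :
    (List.range M.length).foldl (fun o i =>
        o.set (pvRank M i) (some ((M.getD i (' ', 0)).1, ab.getD (pvRank M i) ' ')))
      (List.replicate M.length none)
    = (List.range M.length).map (fun r =>
        some (((PySem.List.sorted M (fun x => x.2) true).getD r (' ', 0)).1, ab.getD r ' ')) := by
  have hndM : M.Nodup := hnd.of_map
  have hfold :
      (List.range M.length).foldl (fun o i =>
          o.set (pvRank M i) (some ((M.getD i (' ', 0)).1, ab.getD (pvRank M i) ' ')))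
        (List.replicate M.length none)
      = ((List.range M.length).map (fun i =>
          (pvRank M i, ((M.getD i (' ', 0)).1, ab.getD (pvRank M i) ' ')))).foldl
          (fun o p => o.set p.1 (some p.2)) (List.replicate M.length none) := by
    rw [List.foldl_map]
  rw [hfold]
  have hidxnd : (((List.range M.length).map (fun i =>
      (pvRank M i, ((M.getD i (' ', 0)).1, ab.getD (pvRank M i) ' ')))).map Prod.fst).Nodup := by
    rw [List.map_map]
    have : ((List.range M.length).map (Prod.fst ∘ fun i =>
        (pvRank M i, ((M.getD i (' ', 0)).1, ab.getD (pvRank M i) ' ')))) =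
        (List.range M.length).map (fun i => pvRank M i) := rfl
    rw [this]
    exact (List.nodup_range).map_on (fun a ha b hb hab =>
      pv_rank_inj M hndM (List.mem_range.mp ha) (List.mem_range.mp hb) hab)
  apply List.ext_getElem
  · rw [pv_foldl_set_length, List.length_replicate, List.length_map, List.length_range]
  · intro r h1 h2
    have hr : r < M.length := by
      simpa [pv_foldl_set_length, List.length_replicate] using h1
    obtain ⟨i, hil, hir⟩ := pv_rank_surj M hndM r hr
    have hmem : (r, ((M.getD i (' ', 0)).1, ab.getD r ' ')) ∈
        (List.range M.length).map (fun i =>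
          (pvRank M i, ((M.getD i (' ', 0)).1, ab.getD (pvRank M i) ' '))) := by
      apply List.mem_map.mpr
      exact ⟨i, List.mem_range.mpr hil, by rw [hir]⟩
    have hget := pv_foldl_set_getD _ (List.replicate M.length none) r
      ((M.getD i (' ', 0)).1, ab.getD r ' ') hidxnd hmem
      (by rw [List.length_replicate]; exact hr)
    rw [← List.getD_eq_getElem _ none h1, hget]
    have hsg := pv_sorted_getD_rank M i hil
    rw [hir] at hsg
    rw [List.getElem_map, List.getElem_range, hsg]

-- the two ports return the same value
theorem pv_ports_eq (abc sentences : String) :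
    decode_abc abc sentences = decode_abc_alt abc sentences := by
  simp only [decode_abc, decode_abc_alt]
  set s : List Char := sentences.toList with hs
  set ab : List Char := abc.toList with hab
  set q : Char → Bool := fun ch => PySem.Str.isIn (String.ofList [ch]) abc with hq
  set K : List Char := (PySem.Set.ofList s).filter q with hK
  set M : List (Char × Int) := K.map (fun k => (k, (s.count k : Int))) with hM
  -- A's filtered dict has items M
  have h_only : ((PySem.Dict.counter s).items.foldl (fun d kv =>
      if PySem.Str.isIn (String.ofList [kv.1]) abc then d.insert kv.1 kv.2 else d)
      PySem.Dict.empty).items = M := by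
    have hstep := pv_foldl_if_filter (fun kv : Char × Int => PySem.Str.isIn (String.ofList [kv.1]) abc)
      (fun (d : PySem.Dict Char Int) kv => d.insert kv.1 kv.2) (PySem.Dict.counter s).items PySem.Dict.empty
    rw [hstep]
    have hfil : (PySem.Dict.counter s).items.filter (fun kv => q kv.1) = M := by
      rw [PySem.Dict.items_counter, List.filter_map]
      rw [hM, hK]
      congr 1
    rw [hfil]
    have := PySem.Dict.items_foldl_insert_fresh M (fun kv => kv.1) (fun kv => kv.2)
      PySem.Dict.empty (by intro a _; exact PySem.Dict.contains_empty _)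
      (by
        have hKnd : K.Nodup := (PySem.Set.nodup_ofList s).filter _
        have hmk : M.map (fun kv => kv.1) = K := by
          rw [hM, List.map_map]
          exact (List.map_congr_left fun k _ => rfl).trans K.map_id
        rw [hmk]; exact hKnd)
    simpa using this
  -- B's counting dict has items M too
  have h_counts : (s.foldl (fun d ch =>
      if PySem.Str.isIn (String.ofList [ch]) abc then d.modify ch 0 (· + 1) else d)
      PySem.Dict.empty).items = M := by
    have hstep := pv_foldl_if_filter (fun ch : Char => PySem.Str.isIn (String.ofList [ch]) abc)
      (fun (d : PySem.Dict Char Int) ch => d.modify ch 0 (· + 1)) s PySem.Dict.empty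
    rw [hstep, ← PySem.Dict.counter_eq_foldl, PySem.Dict.items_counter, pv_ofList_filter, ← hK]
    rw [hM]
    apply List.map_congr_left
    intro k hk
    have hqk : q k = true := (List.mem_filter.mp (hK ▸ hk)).2
    rw [List.count_filter hqk]
  rw [h_counts, h_only]
  have hKnd : K.Nodup := (PySem.Set.nodup_ofList s).filter _
  have hMfst : M.map (fun kv => kv.1) = K := by
    rw [hM, List.map_map]; exact (List.map_congr_left fun k _ => rfl).trans K.map_id
  have hMnd : (M.map (fun kv => kv.1)).Nodup := hMfst ▸ hKnd
  set S := PySem.List.sorted M (fun x => x.2) true with hSdef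
  have hSlen : S.length = M.length := PySem.List.length_sorted M (fun x => x.2) true
  have hSperm := PySem.List.sorted_perm M (fun x : Char × Int => x.2) true
  have hSfnd : (S.map (fun kv => kv.1)).Nodup :=
    (hSperm.map (fun kv => kv.1)).nodup_iff.mpr hMnd
  -- the fresh-key index map shared by both sides
  have hrangemap : (List.range S.length).map (fun i => (S.getD i (' ', (0:Int))).1)
      = S.map (fun kv => kv.1) := by
    apply List.ext_getElem
    · simp
    · intro i h1 h2
      simp only [List.getElem_map, List.getElem_range]
      rw [List.getD_eq_getElem _ _ (by simpa using h2)]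
  -- A side: its dict items are the sorted heads paired with abc prefix
  have hA : ((PySem.List.pyRange 0 (S.length : Int) 1).foldl (fun d i =>
      d.insert (PySem.List.pyGetD S i (' ', 0)).1
               (PySem.List.pyGetD ab i ' ')) PySem.Dict.empty).items
      = (List.range S.length).map (fun i => ((S.getD i (' ', (0:Int))).1, ab.getD i ' ')) := by
    rw [PySem.List.pyRange_one, List.foldl_map]
    simp only [zero_add, sub_zero, Int.toNat_natCast, PySem.List.pyGetD_natCast]
    have hiA := PySem.Dict.items_foldl_insert_fresh (List.range S.length)
      (fun i => (S.getD i (' ', (0:Int))).1) (fun i => ab.getD i ' ')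
      PySem.Dict.empty (fun a _ => PySem.Dict.contains_empty _)
      (by rw [hrangemap]; exact hSfnd)
    rw [hiA]
    rfl
  rw [hA]
  -- B side: rewrite the rank loop, build the slot list, then read the final dict
  have hbody : (fun (o : List (Option (Char × Char))) (i : Nat) =>
      o.set ((List.range M.length).foldl (fun r j =>
          if (M.getD j (' ', 0)).2 > (M.getD i (' ', 0)).2 ∨
             ((M.getD j (' ', 0)).2 = (M.getD i (' ', 0)).2 ∧ j < i) then r + 1 else r) 0)
        (some ((M.getD i (' ', 0)).1,
          PySem.List.pyGetD ab (((List.range M.length).foldl (fun r j =>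
            if (M.getD j (' ', 0)).2 > (M.getD i (' ', 0)).2 ∨
               ((M.getD j (' ', 0)).2 = (M.getD i (' ', 0)).2 ∧ j < i) then r + 1 else r) 0 : Nat) : Int) ' ')))
      = (fun (o : List (Option (Char × Char))) (i : Nat) =>
      o.set (pvRank M i) (some ((M.getD i (' ', 0)).1, ab.getD (pvRank M i) ' '))) := by
    funext o i
    rw [pv_foldl_count, PySem.List.pyGetD_natCast]
    simp only [Nat.zero_add]
    rfl
  rw [hbody, pv_build_out ab M hMnd, ← hSdef, List.foldl_map]
  have hmatch : (fun (x : PySem.Dict Char Char) (y : Nat) =>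
      match some ((S.getD y (' ', (0:Int))).1, ab.getD y ' ') with
      | some q => x.insert q.1 q.2
      | none => x)
      = fun (x : PySem.Dict Char Char) (y : Nat) =>
          x.insert (S.getD y (' ', (0:Int))).1 (ab.getD y ' ') := rfl
  rw [hmatch]
  have hiB := PySem.Dict.items_foldl_insert_fresh (List.range S.length)
    (fun r => (S.getD r (' ', (0:Int))).1) (fun r => ab.getD r ' ')
    PySem.Dict.empty (fun a _ => PySem.Dict.contains_empty _)
    (by rw [hrangemap]; exact hSfnd)
  have hiB' : (List.foldl (fun (d : PySem.Dict Char Char) (r : Nat) =>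
      d.insert (S.getD r (' ', (0:Int))).1 (ab.getD r ' ')) PySem.Dict.empty
      (List.range S.length)).items
      = (List.range S.length).map (fun r => ((S.getD r (' ', (0:Int))).1, ab.getD r ' ')) := by
    simpa using hiB
  rw [hSlen] at hiB'
  rw [hiB', hSlen]

-- ===== VERDICT (by name: the statement is the Claim_ definition above) =====
theorem decode_abc_spec : Claim_equal_decode_abc := by
  intro abc sentences _
  unfold Spec_decode_abc
  exact pv_ports_eq abc sentences
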